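-- pv_equiv track=rewrite | github.com/nebiyuelias1/coding-problems | codility_problems/problem-two.py | solution
-- ===== SOURCE A (Python) =====
-- def solution(P, S):
--     people_count = sum(P)
--     seats = sorted(S, reverse=True)
--
--     car_count = 0
--     while people_count > 0:
--         people_count = people_count - seats[car_count]
--         car_count = car_count + 1
--
--     return car_count
-- ===== SOURCE B (Python) =====
-- def solution(P, S):
--     remaining = sum(P)
--     seats = list(S)
--     car_count = 0
--     while remaining > 0:
--         largest = max(seats)
--         seats.remove(largest)
--         remaining = remaining - largest
--         car_count = car_count + 1
--     return car_count
-- ===== Notes on version B (the rewrite author's own statement) =====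
-- stated objective: alternative
-- what changed: A sorts all of S descending and walks the sorted list by index; B never sorts: it keeps a working copy of S and repeatedly extracts the current maximum (max + remove) until the summed people count is covered, doing selection only for the seats it actually uses.
-- outside the precondition, e.g. on solution([5], [2]): A raises IndexError, B raises ValueError
import Mathlib
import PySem

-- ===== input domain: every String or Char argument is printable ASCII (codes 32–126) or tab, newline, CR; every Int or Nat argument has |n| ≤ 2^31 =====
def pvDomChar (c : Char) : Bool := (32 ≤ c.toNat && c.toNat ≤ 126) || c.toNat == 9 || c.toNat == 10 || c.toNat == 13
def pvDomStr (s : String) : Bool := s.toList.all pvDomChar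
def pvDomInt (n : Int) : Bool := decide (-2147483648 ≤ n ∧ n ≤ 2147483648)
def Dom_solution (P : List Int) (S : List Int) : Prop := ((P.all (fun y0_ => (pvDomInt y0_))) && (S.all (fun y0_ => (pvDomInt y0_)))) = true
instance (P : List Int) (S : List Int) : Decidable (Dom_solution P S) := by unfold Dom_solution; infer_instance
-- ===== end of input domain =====

-- B replaces A's full descending sort + index loop by repeated extraction of the
-- current maximum from a working copy of S (selection on demand); same results, no sort.

-- ===== PORT A =====
-- A's while loop: walks the sorted-descending seats front to back, subtracting,
-- until people_count ≤ 0.  The '[]' branch is where Python A raises IndexError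
-- (excluded by Pre_solution); the value returned there is unclaimed.
def solALoop (seats : List Int) (people_count : Int) (car_count : Int) : Int :=
  if people_count > 0 then
    match seats with
    | [] => car_count          -- Python: IndexError (outside Pre_solution)
    | s :: rest => solALoop rest (people_count - s) (car_count + 1)
  else car_count

def solution (P : List Int) (S : List Int) : Int :=
  solALoop (PySem.List.sorted S (fun x => x) true) P.sum 0

-- ===== PORT B =====
-- B's while loop: largest = max(seats); seats.remove(largest); subtract, count.
-- The 'none' branches are where Python B raises ValueError (outside Pre_solution).
def solBLoop (seats : List Int) (remaining : Int) (car_count : Int) : Int :=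
  if remaining > 0 then
    match h : PySem.List.max? seats (fun y => y) with
    | none => car_count        -- Python: max([]) raises ValueError (outside Pre_solution)
    | some largest =>
      match h2 : PySem.List.remove? seats largest with
      | none => car_count      -- unreachable: largest ∈ seats
      | some rest => solBLoop rest (remaining - largest) (car_count + 1)
  else car_count
termination_by seats.length
decreasing_by
  have hm := PySem.List.max?_mem h
  rw [PySem.List.remove?_eq_some_erase seats largest hm] at h2
  injection h2 with h3
  subst h3
  have h4 := List.length_erase_of_mem hm
  have h6 : 0 < seats.length := List.length_pos_of_ne_nil (List.ne_nil_of_mem hm)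
  omega

def solution_alt (P : List Int) (S : List Int) : Int :=
  solBLoop S P.sum 0

-- ===== PRECONDITION & SPEC =====
-- Exactly the inputs where Python A returns normally: the positive seats can cover
-- sum(P); otherwise A's index walks past the end of seats (IndexError).
def Pre_solution (P : List Int) (S : List Int) : Prop :=
  P.sum ≤ (S.filter (fun x => decide (0 < x))).sum
instance (P : List Int) (S : List Int) : Decidable (Pre_solution P S) := by
  unfold Pre_solution; infer_instance

def pvWitness_solution : List Int × List Int := ([2, 3], [1, 4, 1])

def Spec_solution (P : List Int) (S : List Int) (out : Int) : Prop := out = solution_alt P S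
instance (P : List Int) (S : List Int) (out : Int) : Decidable (Spec_solution P S out) := by unfold Spec_solution; infer_instance

-- ===== CLAIM (what is proved, stated in full; the proofs are below) =====
def Claim_equal_solution : Prop := ∀ (P : List Int) (S : List Int), Dom_solution P S → Pre_solution P S → Spec_solution P S (solution P S)

-- ===== LEMMAS AND PROOFS =====

-- The first maximum extracted by B is the head of A's descending sort, and the
-- rest of the sort is the sort of the remaining seats.
lemma sorted_rev_eq_max_cons (seats : List Int) (m : Int)
    (hm : PySem.List.max? seats (fun y => y) = some m) :
    PySem.List.sorted seats (fun x => x) true =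
      m :: PySem.List.sorted (seats.erase m) (fun x => x) true := by
  have hmem : m ∈ seats := PySem.List.max?_mem hm
  have hmax : ∀ y ∈ seats, y ≤ m := fun y hy => PySem.List.max?_isMax hm y hy
  have hperm : (PySem.List.sorted seats (fun x : Int => x) true).Perm
      (m :: PySem.List.sorted (seats.erase m) (fun x : Int => x) true) :=
    ((PySem.List.sorted_perm seats (fun x : Int => x) true).trans
        (List.perm_cons_erase hmem)).trans
      (List.Perm.cons m (PySem.List.sorted_perm (seats.erase m) (fun x : Int => x) true).symm)
  have h1 : List.Pairwise (fun a b : Int => -a ≤ -b)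
      (PySem.List.sorted seats (fun x : Int => x) true) :=
    (PySem.List.sorted_pairwise_rev seats (fun x : Int => x)).imp (fun h => by omega)
  have h2 : List.Pairwise (fun a b : Int => -a ≤ -b)
      (m :: PySem.List.sorted (seats.erase m) (fun x : Int => x) true) := by
    refine List.pairwise_cons.mpr ⟨?_, ?_⟩
    · intro y hy
      have : y ∈ seats := List.mem_of_mem_erase ((PySem.List.mem_sorted (seats.erase m) (fun x : Int => x) true y).mp hy)
      have := hmax y this; omega
    · exact (PySem.List.sorted_pairwise_rev (seats.erase m) (fun x : Int => x)).imp
        (fun h => by omega)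
  exact PySem.List.eq_of_perm_of_pairwise_le_of_injective (fun x : Int => -x)
    neg_injective hperm h1 h2

-- The two loops agree on every state (both fall out of the loop with `car_count`
-- when the seats run out, so no precondition is needed here).
lemma loops_agree (seats : List Int) (r c : Int) :
    solALoop (PySem.List.sorted seats (fun x => x) true) r c = solBLoop seats r c := by
  induction hn : seats.length using Nat.strong_induction_on generalizing seats r c with
  | _ n ih =>
    rw [solBLoop.eq_def]
    by_cases hr : r > 0
    · simp only [hr, if_true]
      match h : PySem.List.max? seats (fun y => y) with
      | none =>
        have : seats = [] := (PySem.List.max?_eq_none_iff seats (fun y => y)).mp h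
        subst this
        simp [solALoop, hr, PySem.List.sorted]
      | some m =>
        have hmem : m ∈ seats := PySem.List.max?_mem h
        rw [sorted_rev_eq_max_cons seats m h]
        split
        · rename_i heq; simp at heq
        · rename_i largest heq
          have hlm : largest = m := by injection heq with h'; omega
          subst hlm
          split
          · rename_i h2
            rw [PySem.List.remove?_eq_some_erase seats largest hmem] at h2
            cases h2
          · rename_i rest h2
            rw [PySem.List.remove?_eq_some_erase seats largest hmem] at h2
            injection h2 with h3
            subst h3
            unfold solALoop
            simp only [hr, if_true]
            have hlt : (seats.erase largest).length < n := by
              have := List.length_erase_of_mem hmem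
              have := List.length_pos_of_ne_nil (List.ne_nil_of_mem hmem)
              omega
            exact ih _ hlt (seats.erase largest) (r - largest) (c + 1) rfl
    · unfold solALoop; simp [hr]

-- ===== VERDICT (by name: the statement is the Claim_ definition above) =====
theorem solution_spec : Claim_equal_solution := by
  intro P S _ _
  unfold Spec_solution solution solution_alt
  exact loops_agree S P.sum 0
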